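-- pv_equiv track=rewrite | github.com/biamsarmento/cifraBloco-ModosOp | gcmPrimeira.py | increment_iv
-- ===== SOURCE A (Python) =====
-- def matrix_to_bytes(matrix):
--     """Converte uma matriz 4x4 de inteiros para uma lista de bytes (16 bytes no total)."""
--     return [byte for row in matrix for byte in row]  # Flatten a matriz e converte para bytes
--
-- def bytes_to_matrix(bytes_data):
--     """Converte uma lista de 16 bytes de volta para uma matriz 4x4 de inteiros."""
--     return [bytes_data[i:i+4] for i in range(0, len(bytes_data), 4)]
--
-- def increment_iv(iv_matrix):
--     # Converte a matriz 4x4 em uma lista de bytes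
--     iv_bytes = matrix_to_bytes(iv_matrix)
--
--     # Incrementa o último byte
--     for i in reversed(range(len(iv_bytes))):
--         iv_bytes[i] += 1
--         if iv_bytes[i] < 256:  # Se não ultrapassar 255, parar o incremento
--             break
--         iv_bytes[i] = 0  # Caso ultrapasse 255, volta para 0 e propaga o incremento
--
--     # Converte de volta para uma matriz 4x4
--     return bytes_to_matrix(iv_bytes)
-- ===== SOURCE B (Python) =====
-- def increment_iv(iv_matrix):
--     # Flatten, count the trailing run of bytes that would overflow (>= 255),
--     # then rebuild: untouched prefix + one incremented byte + zeroed suffix.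
--     flat = [b for row in iv_matrix for b in row]
--     n = len(flat)
--     t = 0
--     for b in reversed(flat):
--         if b < 255:
--             break
--         t += 1
--     if t == n:
--         out = [0] * n
--     else:
--         out = flat[:n - t - 1] + [flat[n - t - 1] + 1] + [0] * t
--     return [out[i:i+4] for i in range(0, n, 4)]
-- ===== Notes on version B (the rewrite author's own statement) =====
-- stated objective: alternative
-- what changed: Replaces A's in-place carry-propagation loop over descending indices with a count of the trailing run of overflowing bytes followed by a single slice-based rebuild (prefix ++ incremented byte ++ zeros).
import Mathlib
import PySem

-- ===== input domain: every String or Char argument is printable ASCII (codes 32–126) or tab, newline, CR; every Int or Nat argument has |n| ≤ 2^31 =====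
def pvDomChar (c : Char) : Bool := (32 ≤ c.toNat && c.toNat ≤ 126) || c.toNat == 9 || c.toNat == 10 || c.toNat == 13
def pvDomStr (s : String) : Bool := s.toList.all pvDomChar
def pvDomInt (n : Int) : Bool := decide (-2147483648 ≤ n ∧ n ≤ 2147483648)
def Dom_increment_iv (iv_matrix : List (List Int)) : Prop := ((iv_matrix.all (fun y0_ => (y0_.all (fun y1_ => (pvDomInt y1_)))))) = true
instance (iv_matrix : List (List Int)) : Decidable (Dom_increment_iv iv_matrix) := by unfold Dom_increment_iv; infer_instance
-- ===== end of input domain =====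

-- B replaces A's in-place carry loop by counting the trailing overflow run and
-- rebuilding the list once (alternative decomposition, same cost).

-- ===== PORT A =====
-- [byte for row in matrix for byte in row]
def matrix_to_bytes (matrix : List (List Int)) : List Int :=
  matrix.flatMap (fun row => row)

-- [bytes_data[i:i+4] for i in range(0, len(bytes_data), 4)]
def bytes_to_matrix (bytes_data : List Int) : List (List Int) :=
  (PySem.List.pyRange 0 (bytes_data.length : Int) 4).map
    (fun i => PySem.List.slice bytes_data (some i) (some (i + 4)))

-- the for-loop over reversed(range(len(iv_bytes))) with break, mutating iv_bytes
def incLoopA (bs : List Int) : List Nat → List Int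
  | [] => bs
  | i :: rest =>
    let v := bs.getD i 0 + 1        -- iv_bytes[i] += 1 (i is always in range)
    if v < 256 then bs.set i v       -- break
    else incLoopA (bs.set i 0) rest  -- iv_bytes[i] = 0, continue

def increment_iv (iv_matrix : List (List Int)) : List (List Int) :=
  let iv_bytes := matrix_to_bytes iv_matrix
  let iv_bytes := incLoopA iv_bytes (List.range iv_bytes.length).reverse
  bytes_to_matrix iv_bytes

-- ===== PORT B =====
-- the for-loop over reversed(flat) with break, counting t
def trailCount : List Int → Nat
  | [] => 0
  | b :: rest => if b < 255 then 0 else trailCount rest + 1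

def increment_iv_alt (iv_matrix : List (List Int)) : List (List Int) :=
  let flat := iv_matrix.flatMap (fun row => row)
  let n := flat.length
  let t := trailCount flat.reverse
  let out :=
    if t = n then List.replicate n 0
    else flat.take (n - t - 1) ++ [flat.getD (n - t - 1) 0 + 1] ++ List.replicate t 0
  (PySem.List.pyRange 0 (n : Int) 4).map
    (fun i => PySem.List.slice out (some i) (some (i + 4)))

-- ===== PRECONDITION & SPEC =====
def Spec_increment_iv (iv_matrix : List (List Int)) (out : List (List Int)) : Prop := out = increment_iv_alt iv_matrix
instance (iv_matrix : List (List Int)) (out : List (List Int)) : Decidable (Spec_increment_iv iv_matrix out) := by unfold Spec_increment_iv; infer_instance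

-- ===== CLAIM (what is proved, stated in full; the proofs are below) =====
def Claim_equal_increment_iv : Prop := ∀ (iv_matrix : List (List Int)), Dom_increment_iv iv_matrix → Spec_increment_iv iv_matrix (increment_iv iv_matrix)

-- ===== LEMMAS AND PROOFS =====

theorem trailCount_le (r : List Int) : trailCount r ≤ r.length := by
  induction r with
  | nil => simp [trailCount]
  | cons b rest ih =>
    simp only [trailCount, List.length_cons]
    split <;> omega

-- A's loop seen on the reversed list
def revInc : List Int → List Int
  | [] => []
  | b :: rest => if b + 1 < 256 then (b + 1) :: rest else 0 :: revInc rest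

-- indices below ys.length never touch an appended suffix
theorem incLoopA_append (ys zs : List Int) (idxs : List Nat)
    (h : ∀ i ∈ idxs, i < ys.length) :
    incLoopA (ys ++ zs) idxs = incLoopA ys idxs ++ zs := by
  induction idxs generalizing ys with
  | nil => simp [incLoopA]
  | cons i rest ih =>
    have hi : i < ys.length := h i (by simp)
    simp only [incLoopA, List.getD_append _ _ _ _ hi, List.set_append_left _ _ hi]
    split
    · rfl
    · exact ih (ys.set i 0) (by simpa using fun j hj => h j (by simp [hj]))

theorem incLoopA_eq_revInc (bs : List Int) :
    incLoopA bs (List.range bs.length).reverse = (revInc bs.reverse).reverse := by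
  induction bs using List.reverseRecOn with
  | nil => simp [incLoopA, revInc]
  | append_singleton ys b ih =>
    have hlen : (ys ++ [b]).length = ys.length + 1 := by simp
    rw [hlen, List.range_succ]
    simp only [List.reverse_append, List.reverse_cons, List.reverse_nil, List.nil_append,
      List.cons_append, incLoopA]
    have hget : (ys ++ [b]).getD ys.length 0 = b := by
      simp [List.getD]
    have hset : ∀ v : Int, (ys ++ [b]).set ys.length v = ys ++ [v] := by
      intro v; rw [List.set_append_right _ _ (le_refl ys.length)]; simp
    rw [hget, hset, hset]
    by_cases hb : b + 1 < 256
    · simp [hb, revInc]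
    · rw [if_neg hb]
      rw [incLoopA_append ys [0] _ (by simp [List.mem_reverse, List.mem_range])]
      rw [ih]
      simp [revInc, hb]

theorem revInc_eq_trail (r : List Int) :
    revInc r = if trailCount r = r.length then List.replicate r.length 0
      else List.replicate (trailCount r) 0 ++ [r.getD (trailCount r) 0 + 1] ++ r.drop (trailCount r + 1) := by
  induction r with
  | nil => simp [revInc, trailCount]
  | cons b rest ih =>
    by_cases hb : b < 255
    · have hb' : b + 1 < 256 := by omega
      have ht : trailCount (b :: rest) = 0 := by simp [trailCount, hb]
      simp [revInc, hb', ht, List.getD]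
    · have hb' : ¬ b + 1 < 256 := by omega
      have ht : trailCount (b :: rest) = trailCount rest + 1 := by simp [trailCount, hb]
      rw [ht]
      simp only [revInc, if_neg hb', ih]
      by_cases he : trailCount rest = rest.length
      · simp [he, List.replicate_succ]
      · have hne : ¬ trailCount rest + 1 = (b :: rest).length := by
          simp only [List.length_cons]; omega
        rw [if_neg he, if_neg hne]
        simp [List.replicate_succ, List.getD]

theorem getD_reverse (l : List Int) (t : Nat) (ht : t < l.length) :
    l.reverse.getD t 0 = l.getD (l.length - 1 - t) 0 := by
  have h1 : l.length - 1 - t < l.length := by omega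
  have h2 : t < l.reverse.length := by simpa using ht
  rw [List.getD_eq_getElem _ _ h2, List.getD_eq_getElem _ _ h1,
    List.getElem_reverse]

theorem core_eq (flat : List Int) :
    incLoopA flat (List.range flat.length).reverse =
      (if trailCount flat.reverse = flat.length then List.replicate flat.length 0
       else flat.take (flat.length - trailCount flat.reverse - 1)
            ++ [flat.getD (flat.length - trailCount flat.reverse - 1) 0 + 1]
            ++ List.replicate (trailCount flat.reverse) 0) := by
  rw [incLoopA_eq_revInc, revInc_eq_trail]
  set t := trailCount flat.reverse with htdef
  by_cases he : t = flat.reverse.length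
  · rw [if_pos he, if_pos (by simpa using he)]
    simp
  · have hn : ¬ t = flat.length := by simpa using he
    have ht : t < flat.length := by
      have := trailCount_le flat.reverse
      simp at this
      omega
    rw [if_neg he, if_neg hn]
    simp only [List.reverse_append, List.reverse_replicate, List.reverse_cons,
      List.reverse_nil, List.nil_append, List.cons_append]
    rw [List.reverse_drop, List.reverse_reverse, getD_reverse flat t ht]
    have h1 : flat.reverse.length - (t + 1) = flat.length - t - 1 := by simp; omega
    have h2 : flat.length - 1 - t = flat.length - t - 1 := by omega
    rw [h1, h2]
    simp

-- ===== VERDICT (by name: the statement is the Claim_ definition above) =====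
theorem out_length (flat : List Int) :
    (if trailCount flat.reverse = flat.length then List.replicate flat.length (0 : Int)
     else flat.take (flat.length - trailCount flat.reverse - 1)
          ++ [flat.getD (flat.length - trailCount flat.reverse - 1) 0 + 1]
          ++ List.replicate (trailCount flat.reverse) 0).length = flat.length := by
  have ht : trailCount flat.reverse ≤ flat.length := by
    have := trailCount_le flat.reverse; simpa using this
  split
  · simp
  · rename_i h
    simp only [List.length_append, List.length_take, List.length_cons,
      List.length_nil, List.length_replicate]
    omega

theorem increment_iv_spec : Claim_equal_increment_iv := by
  intro iv_matrix _
  simp only [Spec_increment_iv, increment_iv, increment_iv_alt, matrix_to_bytes,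
    bytes_to_matrix]
  rw [core_eq, out_length]
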